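-- pv_equiv track=rewrite | github.com/XaiverYuan/ConfRAG | analysisResult/grade.py | bad_partition
-- ===== SOURCE A (Python) =====
-- def bad_partition(grouping_pred:list[list[int]],grouping_true:list[list[int]]):
--     """
--     Check if grouping_pred is a bad partition.
--
--     Parameters
--     ----------
--     grouping_pred : list[list[int]]
--         Predicted grouping of elements
--     grouping_true : list[list[int]]
--         True grouping of elements
--
--     Returns
--     -------
--     str
--         "Missing Elements" if elements are missing
--         "Extra Elements" if there are extra elements
--         "Duplicate Elements" if there are duplicate elements
--         "Normal" if the partition is valid
--     """
--     # Check if both groups contain the same elements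
--     elements_true = {e for group in grouping_true for e in group}
--     elements_pred = {e for group in grouping_pred for e in group}
--     if len(elements_true-elements_pred)>0:
--         return "Missing Elements"
--     if len(elements_pred-elements_true)>0:
--         return "Extra Elements"
--     # Check if each index appears only once in grouping_pred
--     existed_idx=set()
--     for group in grouping_pred:
--         for element in group:
--             if element in existed_idx:
--                 return "Duplicate Elements"
--             existed_idx.add(element)
--     return "Normal"
-- ===== SOURCE B (Python) =====
-- def bad_partition(grouping_pred: list[list[int]], grouping_true: list[list[int]]):
--     elements_true = {e for group in grouping_true for e in group}
--     flat = [e for group in grouping_pred for e in group]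
--     elements_pred = set(flat)
--     if len(elements_true - elements_pred) > 0:
--         return "Missing Elements"
--     if len(elements_pred - elements_true) > 0:
--         return "Extra Elements"
--     # duplicates exist iff total count exceeds distinct count
--     if len(flat) != len(elements_pred):
--         return "Duplicate Elements"
--     return "Normal"
-- ===== Notes on version B (the rewrite author's own statement) =====
-- stated objective: simpler
-- what changed: The duplicate check no longer maintains an incremental seen-set with an early-exit nested scan; B flattens the predicted groups once and declares duplicates when the flat list's length differs from its distinct-element count.
import Mathlib
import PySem

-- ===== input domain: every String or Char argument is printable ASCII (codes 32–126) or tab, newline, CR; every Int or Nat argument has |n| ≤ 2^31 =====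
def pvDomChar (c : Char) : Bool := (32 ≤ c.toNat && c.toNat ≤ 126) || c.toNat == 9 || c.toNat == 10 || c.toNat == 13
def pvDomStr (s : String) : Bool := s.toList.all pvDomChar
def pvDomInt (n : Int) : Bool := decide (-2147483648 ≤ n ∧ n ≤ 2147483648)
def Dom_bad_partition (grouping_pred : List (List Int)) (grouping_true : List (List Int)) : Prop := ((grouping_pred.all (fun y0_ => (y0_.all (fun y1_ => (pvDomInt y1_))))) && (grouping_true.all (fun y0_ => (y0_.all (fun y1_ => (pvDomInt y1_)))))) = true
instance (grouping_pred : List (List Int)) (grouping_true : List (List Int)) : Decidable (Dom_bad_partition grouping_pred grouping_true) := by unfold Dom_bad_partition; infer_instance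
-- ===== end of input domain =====

-- B replaces A's incremental seen-set duplicate scan (with early exit) by a
-- single flatten plus a total-length vs distinct-count comparison (objective: simpler).

-- ===== PORT A =====

-- inner 'for element in group' loop: none = duplicate found (early return), some s' = updated seen-set
def pvScanElems (s : PySem.Set Int) : List Int → Option (PySem.Set Int)
  | [] => some s
  | e :: rest =>
      if PySem.Set.contains s e then none
      else pvScanElems (PySem.Set.add s e) rest

-- outer 'for group in grouping_pred' loop: true = "Duplicate Elements" was returned
def pvScanGroups (s : PySem.Set Int) : List (List Int) → Bool
  | [] => false
  | g :: gs =>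
      match pvScanElems s g with
      | none => true
      | some s' => pvScanGroups s' gs

def bad_partition (grouping_pred : List (List Int)) (grouping_true : List (List Int)) : String :=
  -- {e for group in grouping_true for e in group}
  let elements_true := grouping_true.foldl (fun s g => g.foldl PySem.Set.add s) PySem.Set.empty
  let elements_pred := grouping_pred.foldl (fun s g => g.foldl PySem.Set.add s) PySem.Set.empty
  if (PySem.Set.diff elements_true elements_pred).length > 0 then "Missing Elements"
  else if (PySem.Set.diff elements_pred elements_true).length > 0 then "Extra Elements"
  else if pvScanGroups PySem.Set.empty grouping_pred then "Duplicate Elements"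
  else "Normal"

-- ===== PORT B =====
def bad_partition_alt (grouping_pred : List (List Int)) (grouping_true : List (List Int)) : String :=
  let elements_true := PySem.Set.ofList (grouping_true.flatMap id)
  let flat := grouping_pred.flatMap id
  let elements_pred := PySem.Set.ofList flat
  if (PySem.Set.diff elements_true elements_pred).length > 0 then "Missing Elements"
  else if (PySem.Set.diff elements_pred elements_true).length > 0 then "Extra Elements"
  else if flat.length ≠ elements_pred.length then "Duplicate Elements"
  else "Normal"

-- ===== PRECONDITION & SPEC =====
def Spec_bad_partition (grouping_pred : List (List Int)) (grouping_true : List (List Int)) (out : String) : Prop := out = bad_partition_alt grouping_pred grouping_true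
instance (grouping_pred : List (List Int)) (grouping_true : List (List Int)) (out : String) : Decidable (Spec_bad_partition grouping_pred grouping_true out) := by unfold Spec_bad_partition; infer_instance

-- ===== CLAIM (what is proved, stated in full; the proofs are below) =====
def Claim_equal_bad_partition : Prop := ∀ (grouping_pred : List (List Int)) (grouping_true : List (List Int)), Dom_bad_partition grouping_pred grouping_true → Spec_bad_partition grouping_pred grouping_true (bad_partition grouping_pred grouping_true)

-- ===== LEMMAS AND PROOFS =====

-- the nested set-comprehension fold equals the fold over the flattened list
theorem pvFoldl_flatMap (gs : List (List Int)) (s : PySem.Set Int) :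
    gs.foldl (fun s g => g.foldl PySem.Set.add s) s
      = (gs.flatMap id).foldl PySem.Set.add s := by
  induction gs generalizing s with
  | nil => rfl
  | cons g gs ih => simp [List.flatMap_cons, List.foldl_append, ih]

-- a flat version of A's duplicate scan
def pvScanFlat (s : PySem.Set Int) : List Int → Bool
  | [] => false
  | x :: xs =>
      if PySem.Set.contains s x then true
      else pvScanFlat (PySem.Set.add s x) xs

theorem pvScanFlat_append (g rest : List Int) (s : PySem.Set Int) :
    (match pvScanElems s g with
     | none => true
     | some s' => pvScanFlat s' rest) = pvScanFlat s (g ++ rest) := by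
  induction g generalizing s with
  | nil => rfl
  | cons x g ih =>
      by_cases hm : x ∈ s
      · simp [pvScanElems, pvScanFlat, hm]
      · simp [pvScanElems, pvScanFlat, hm, ih]

theorem pvScanGroups_eq_flat (gs : List (List Int)) (s : PySem.Set Int) :
    pvScanGroups s gs = pvScanFlat s (gs.flatMap id) := by
  induction gs generalizing s with
  | nil => rfl
  | cons g gs ih =>
      simp only [pvScanGroups, List.flatMap_cons, id]
      rw [← pvScanFlat_append]
      cases pvScanElems s g with
      | none => rfl
      | some s' => exact ih s'

theorem pvScanFlat_iff (xs : List Int) (s : PySem.Set Int) (hs : s.Nodup) :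
    pvScanFlat s xs = false ↔ (s ++ xs).Nodup := by
  induction xs generalizing s with
  | nil => simpa [pvScanFlat] using hs
  | cons x xs ih =>
      by_cases hm : x ∈ s
      · have hnot : ¬ (s ++ x :: xs).Nodup := by
          intro hnd
          have hdisj := (List.nodup_append.mp hnd).2.2
          exact absurd rfl (hdisj x hm x (by simp))
        simp [pvScanFlat, hm, hnot]
      · have hadd : PySem.Set.add s x = s ++ [x] := by
          simp [PySem.Set.add, hm]
        have hnodup : (PySem.Set.add s x).Nodup := by
          rw [hadd, List.nodup_append]
          refine ⟨hs, List.nodup_singleton x, ?_⟩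
          intro a ha b hb
          simp only [List.mem_singleton] at hb
          subst hb
          intro hab; subst hab; exact hm ha
        have hstep : pvScanFlat s (x :: xs) = pvScanFlat (PySem.Set.add s x) xs := by
          simp [pvScanFlat, hm]
        rw [hstep, ih _ hnodup, hadd]
        simp [List.append_assoc]

theorem pvLen_ofList_eq_iff (xs : List Int) :
    (PySem.Set.ofList xs).length = xs.length ↔ xs.Nodup := by
  induction xs using List.reverseRecOn with
  | nil => simp [PySem.Set.ofList_nil]
  | append_singleton xs x ih =>
      rw [PySem.Set.ofList_append_singleton]
      by_cases hx : x ∈ xs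
      · have hadd : PySem.Set.add (PySem.Set.ofList xs) x = PySem.Set.ofList xs := by
          simp [PySem.Set.add, hx]
        have hle := PySem.Set.length_ofList_le xs
        rw [hadd]
        simp only [List.length_append, List.length_cons, List.length_nil]
        constructor
        · intro hlen; omega
        · intro hnd
          have hdisj := (List.nodup_append.mp hnd).2.2
          exact absurd rfl (hdisj x hx x (by simp))
      · have hadd : PySem.Set.add (PySem.Set.ofList xs) x
            = PySem.Set.ofList xs ++ [x] := by
          simp [PySem.Set.add, hx]
        rw [hadd]
        simp only [List.length_append, List.length_cons, List.length_nil]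
        rw [List.nodup_append]
        constructor
        · intro hlen
          refine ⟨ih.mp (by omega), List.nodup_singleton x, ?_⟩
          intro a ha b hb
          simp only [List.mem_singleton] at hb
          subst hb
          intro hab; subst hab; exact hx ha
        · rintro ⟨hnd, -, -⟩
          have := ih.mpr hnd; omega

-- A's duplicate scan answers exactly B's length comparison
theorem pvDup_eq (pred : List (List Int)) :
    pvScanGroups ([] : PySem.Set Int) pred
      = decide ((pred.flatMap id).length ≠ (PySem.Set.ofList (pred.flatMap id)).length) := by
  set flat := pred.flatMap id with hflat
  rw [pvScanGroups_eq_flat, ← hflat]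
  have h1 : pvScanFlat ([] : PySem.Set Int) flat = false ↔ flat.Nodup := by
    simpa using pvScanFlat_iff flat ([] : PySem.Set Int) List.nodup_nil
  have h2 := pvLen_ofList_eq_iff flat
  by_cases h : flat.Nodup
  · rw [h1.mpr h]
    have := h2.mpr h
    simp [this]
  · have hne : pvScanFlat ([] : PySem.Set Int) flat = true := by
      cases hb : pvScanFlat ([] : PySem.Set Int) flat
      · exact absurd (h1.mp hb) h
      · rfl
    rw [hne]
    have hlen : flat.length ≠ (PySem.Set.ofList flat).length :=
      fun he => h (h2.mp he.symm)
    simp [hlen]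

-- ===== VERDICT (by name: the statement is the Claim_ definition above) =====
theorem bad_partition_spec : Claim_equal_bad_partition := by
  intro pred tru _
  show bad_partition pred tru = bad_partition_alt pred tru
  unfold bad_partition bad_partition_alt
  simp only [pvFoldl_flatMap, PySem.Set.ofList_eq_foldl, PySem.Set.empty]
  simp only [pvDup_eq]
  simp only [decide_eq_true_eq, PySem.Set.ofList_eq_foldl]
  rfl
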